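-- pv_equiv track=rewrite | github.com/adastezu/Shortest-Common-Superstring | graph_form.py | adj_matrix
-- ===== SOURCE A (Python) =====
-- def weight(x,y):
-- 	n1=len(x)
-- 	n2=len(y)
-- 	n=min(n1,n2)
-- 	i=n
-- 	while i>0 :
-- 		if(x.endswith(y[0:i],0,n1)):
-- 			break
-- 		i=i-1
-- 	return i
--
-- def adj_matrix(x):
-- 	n=len(x)
-- 	a=[[0 for p in range(n)] for q in range(n)]
-- 	i=0
-- 	while(i<n):
-- 		j=0
-- 		while(j<n):
-- 			if not(i==j):
-- 				a[i][j]=weight(x[i],x[j])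
-- 			else:
-- 				a[i][j]=0
-- 			j=j+1
-- 		i=i+1
-- 	return a
-- ===== SOURCE B (Python) =====
-- def _fail(y):
--     m = len(y)
--     f = [0] * m
--     k = 0
--     for i in range(1, m):
--         while k > 0 and y[i] != y[k]:
--             k = f[k - 1]
--         if y[i] == y[k]:
--             k += 1
--         f[i] = k
--     return f
--
-- def _overlap(text, y, f):
--     m = len(y)
--     k = 0
--     for c in text:
--         while k > 0 and (k == m or c != y[k]):
--             k = f[k - 1]
--         if k < m and c == y[k]:
--             k += 1
--     return k
--
-- def adj_matrix(x):
--     n = len(x)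
--     fails = [_fail(y) for y in x]
--     return [[0 if i == j else _overlap(x[i], x[j], fails[j]) for j in range(n)]
--             for i in range(n)]
-- ===== Notes on version B (the rewrite author's own statement) =====
-- stated objective: alternative
-- what changed: Replaces A's per-pair downward scan that re-checks every candidate overlap length with endswith by a KMP failure table computed once per string plus a single automaton pass over the other string for each pair (intended as faster, O(n^2*L) vs O(n^2*L^2); measured ~2.4x in a timing run but unconfirmed at the largest size, where both timed out).
import Mathlib
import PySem

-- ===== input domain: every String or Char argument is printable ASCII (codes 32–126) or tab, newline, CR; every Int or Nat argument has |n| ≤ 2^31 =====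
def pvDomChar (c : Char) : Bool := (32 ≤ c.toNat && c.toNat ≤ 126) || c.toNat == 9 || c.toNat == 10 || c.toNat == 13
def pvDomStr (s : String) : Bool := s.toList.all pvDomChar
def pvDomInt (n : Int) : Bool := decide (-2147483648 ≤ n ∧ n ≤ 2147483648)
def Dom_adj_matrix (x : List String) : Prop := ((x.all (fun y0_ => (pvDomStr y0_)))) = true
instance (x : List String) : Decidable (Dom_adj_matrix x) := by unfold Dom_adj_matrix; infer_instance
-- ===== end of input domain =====

-- B computes each overlap entry via a KMP failure table built once per string plus one
-- automaton pass per pair, instead of A's try-every-length endswith scan; same return value.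

-- ===== PORT A =====
-- weight: i runs from n = min(len x, len y) down to 0; first i with x.endswith(y[0:i], 0, len x) wins
def pvWeightLoop (x y : List Char) (n1 : Nat) : Nat → Nat
  | 0 => 0
  | i + 1 =>
    if PySem.Chars.endswith (PySem.List.slice x (some 0) (some (n1 : Int)))
        (PySem.List.slice y (some 0) (some ((i + 1 : Nat) : Int))) then i + 1
    else pvWeightLoop x y n1 i

def pvWeight (x y : List Char) : Nat :=
  pvWeightLoop x y x.length (min x.length y.length)

def adj_matrix (x : List String) : List (List Int) :=
  let n := x.length
  (List.range n).map (fun i =>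
    (List.range n).map (fun j =>
      if ¬ (i = j) then ((pvWeight (x.getD i "").toList (x.getD j "").toList : Nat) : Int)
      else 0))

-- ===== PORT B =====
-- inner `while k > 0 and y[i] != y[k]` of _fail; fuel = starting k (each pass strictly decreases k)
def pvFailWalk (y : List Char) (f : List Nat) (c : Char) : Nat → Nat → Nat
  | 0, k => k
  | fuel + 1, k =>
    if 0 < k ∧ ¬ (c = y.getD k 'A') then pvFailWalk y f c fuel (f.getD (k - 1) 0) else k

-- the `for i in range(1, m)` loop of _fail: cs = y[i:], f = prefix values written so far, k = f[i-1]
def pvFailGo (y : List Char) : Nat → List Nat → List Char → List Nat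
  | _, f, [] => f
  | k, f, c :: cs =>
    let k1 := pvFailWalk y f c k k
    let k2 := if c = y.getD k1 'A' then k1 + 1 else k1
    pvFailGo y k2 (f ++ [k2]) cs

def pvFail (y : List Char) : List Nat :=
  match y with
  | [] => []
  | _ :: rest => pvFailGo y 0 [0] rest

-- inner `while k > 0 and (k == m or c != y[k])` of _overlap
def pvAutoWalk (y : List Char) (f : List Nat) (c : Char) : Nat → Nat → Nat
  | 0, k => k
  | fuel + 1, k =>
    if 0 < k ∧ (k = y.length ∨ ¬ (c = y.getD k 'A')) then
      pvAutoWalk y f c fuel (f.getD (k - 1) 0)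
    else k

def pvOverlap (text y : List Char) (f : List Nat) : Nat :=
  text.foldl (fun k c =>
    let k1 := pvAutoWalk y f c k k
    if k1 < y.length ∧ c = y.getD k1 'A' then k1 + 1 else k1) 0

def adj_matrix_alt (x : List String) : List (List Int) :=
  let n := x.length
  let fails := x.map (fun y => pvFail y.toList)
  (List.range n).map (fun i =>
    (List.range n).map (fun j =>
      if i = j then 0
      else ((pvOverlap (x.getD i "").toList (x.getD j "").toList (fails.getD j []) : Nat) : Int)))

-- ===== PRECONDITION & SPEC =====
def Spec_adj_matrix (x : List String) (out : List (List Int)) : Prop := out = adj_matrix_alt x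
instance (x : List String) (out : List (List Int)) : Decidable (Spec_adj_matrix x out) := by unfold Spec_adj_matrix; infer_instance

-- ===== CLAIM (what is proved, stated in full; the proofs are below) =====
def Claim_equal_adj_matrix : Prop := ∀ (x : List String), Dom_adj_matrix x → Spec_adj_matrix x (adj_matrix x)

-- ===== LEMMAS AND PROOFS =====

-- overlap spec: the largest j ≤ len y with (y.take j) a suffix of u
def pvOv (y u : List Char) : Nat :=
  Nat.findGreatest (fun j => y.take j <:+ u) y.length

-- extension function: the largest t = j+1 with j in the border chain of y.take k and y[j] = c (else 0)
def pvExt (y : List Char) (k : Nat) (c : Char) : Nat :=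
  Nat.findGreatest
    (fun t => 0 < t ∧ t - 1 ≤ k ∧ t - 1 < y.length ∧ y.take (t - 1) <:+ y.take k ∧ y.getD (t - 1) 'A' = c)
    y.length


-- general helpers --------------------------------------------------------

theorem pv_suffix_snoc {w u : List Char} {a c : Char} :
    (w ++ [a] <:+ u ++ [c]) ↔ (a = c ∧ w <:+ u) := by
  constructor
  · rintro ⟨t, ht⟩
    rw [show t ++ (w ++ [a]) = (t ++ w) ++ [a] by simp, ← List.concat_eq_append,
      ← List.concat_eq_append] at ht
    obtain ⟨h1, h2⟩ := List.concat_inj.mp ht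
    exact ⟨h2, t, h1⟩
  · rintro ⟨rfl, t, rfl⟩
    exact ⟨t, by simp⟩

theorem pv_fG_congr {P Q : ℕ → Prop} [DecidablePred P] [DecidablePred Q] (n : ℕ)
    (h : ∀ t, 0 < t → t ≤ n → (P t ↔ Q t)) :
    Nat.findGreatest P n = Nat.findGreatest Q n := by
  induction n with
  | zero => rfl
  | succ n ih =>
    rw [Nat.findGreatest_succ, Nat.findGreatest_succ]
    by_cases hP : P (n + 1)
    · rw [if_pos hP, if_pos ((h (n+1) (by omega) le_rfl).mp hP)]
    · rw [if_neg hP, if_neg (fun hQ => hP ((h (n+1) (by omega) le_rfl).mpr hQ)),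
        ih (fun t h1 h2 => h t h1 (by omega))]

theorem pv_fG_shrink {P : ℕ → Prop} [DecidablePred P] {b b' : ℕ} (hbb : b ≤ b')
    (hb : ∀ j, j ≤ b' → P j → j ≤ b) :
    Nat.findGreatest P b' = Nat.findGreatest P b := by
  apply le_antisymm
  · rcases Nat.eq_zero_or_pos (Nat.findGreatest P b') with h0 | hpos
    · omega
    · have hP := Nat.findGreatest_of_ne_zero (rfl : Nat.findGreatest P b' = _) (by omega)
      exact Nat.le_findGreatest (hb _ (Nat.findGreatest_le _) hP) hP
  · exact Nat.findGreatest_mono_right P hbb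

-- take/suffix facts -------------------------------------------------------

theorem pv_take_snoc {y : List Char} {j : ℕ} (hj : j < y.length) :
    y.take (j + 1) = y.take j ++ [y.getD j 'A'] := by
  rw [List.take_add_one, List.getD_eq_getElem?_getD]
  simp [List.getElem?_eq_getElem hj]

-- extension of a suffix-of-prefix by one matching character
theorem pv_ext_iff {y u : List Char} {c : Char} {j : ℕ} (hj : j < y.length) :
    (y.take (j + 1) <:+ u ++ [c]) ↔ (y.take j <:+ u ∧ y.getD j 'A' = c) := by
  rw [pv_take_snoc hj, pv_suffix_snoc]
  tauto

-- two prefixes of y that are suffixes of the same list are nested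
theorem pv_nested {y w : List Char} {j k : ℕ} (hj : j ≤ y.length) (hk : k ≤ y.length)
    (hjk : j ≤ k) (h1 : y.take j <:+ w) (h2 : y.take k <:+ w) :
    y.take j <:+ y.take k := by
  apply List.suffix_of_suffix_length_le h1 h2
  simp [List.length_take, hj, hk]; omega

-- the "good failure value" triple
def pvGoodAt (y : List Char) (i k : ℕ) : Prop :=
  k ≤ i ∧ y.take k <:+ y.take (i + 1) ∧
    ∀ j, j ≤ i → y.take j <:+ y.take (i + 1) → j ≤ k

-- chain compression: candidates below a maximal suffix K of w live in take K
theorem pv_chain {y w : List Char} {K J : ℕ} (hKm : K ≤ y.length)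
    (hKw : y.take K <:+ w) (hmax : ∀ j, j ≤ J → y.take j <:+ w → j ≤ K) :
    ∀ j, j ≤ J → j ≤ y.length → (y.take j <:+ w ↔ (j ≤ K ∧ y.take j <:+ y.take K)) := by
  intro j hjJ hjm
  constructor
  · intro h
    have hjK := hmax j hjJ h
    exact ⟨hjK, pv_nested hjm hKm hjK h hKw⟩
  · rintro ⟨hjK, h⟩
    exact h.trans hKw

-- pvExt congruence along a failure link
theorem pv_ext_drop {y : List Char} {f : List Nat} {k : ℕ} {c : Char}
    (hk0 : 0 < k) (hkm : k ≤ y.length)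
    (hcond : k = y.length ∨ ¬ (c = y.getD k 'A'))
    (hgood : pvGoodAt y (k - 1) (f.getD (k - 1) 0)) :
    pvExt y k c = pvExt y (f.getD (k - 1) 0) c := by
  obtain ⟨hb1, hb2, hb3⟩ := hgood
  rw [show k - 1 + 1 = k by omega] at hb2 hb3
  unfold pvExt
  apply pv_fG_congr
  intro t ht0 htm
  constructor
  · rintro ⟨h1, h2, h3, h4, h5⟩
    have htk : t - 1 ≤ k - 1 := by
      rcases Nat.lt_or_ge (t - 1) k with h | h
      · omega
      · have : t - 1 = k := by omega
        subst this
        rcases hcond with h | h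
        · omega
        · exact absurd h5.symm h
    have hle := hb3 (t - 1) htk h4
    exact ⟨h1, hle, h3, pv_nested (by omega) (by omega) hle h4 hb2, h5⟩
  · rintro ⟨h1, h2, h3, h4, h5⟩
    exact ⟨h1, by omega, h3, h4.trans hb2, h5⟩

theorem pv_ext_zero {y : List Char} {c : Char}
    (h : ¬ (0 < y.length ∧ c = y.getD 0 'A')) : pvExt y 0 c = 0 := by
  apply Nat.findGreatest_eq_zero_iff.mpr
  rintro n hn0 hnm ⟨h1, h2, h3, h4, h5⟩
  have : n = 1 := by omega
  subst this
  exact h ⟨h3, h5.symm⟩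

-- base: pvExt at a stopping point
theorem pv_ext_stop {y : List Char} {k : ℕ} {c : Char} (hkm : k ≤ y.length)
    (hcond : ¬ (0 < k ∧ (k = y.length ∨ ¬ (c = y.getD k 'A')))) :
    pvExt y k c = if k < y.length ∧ c = y.getD k 'A' then k + 1 else k := by
  by_cases h : k < y.length ∧ c = y.getD k 'A'
  · rw [if_pos h]
    apply Nat.findGreatest_eq_iff.mpr
    refine ⟨by omega, fun _ => ⟨by omega, by omega, h.1, List.suffix_refl _, h.2.symm⟩,
      fun n hn hnm ⟨_, h2, _, _, _⟩ => by omega⟩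
  · rw [if_neg h]
    have hk0 : k = 0 := by
      by_contra hk
      push Not at hcond
      obtain ⟨hne, hc⟩ := hcond (by omega)
      exact h ⟨by omega, hc⟩
    subst hk0
    exact pv_ext_zero (fun hh => h ⟨hh.1, hh.2⟩)


-- walk lemmas -------------------------------------------------------------

theorem pv_autoWalk_le {y : List Char} {f : List Nat} {c : Char}
    (hf : ∀ t, t < f.length → pvGoodAt y t (f.getD t 0)) :
    ∀ fuel k, k ≤ f.length → pvAutoWalk y f c fuel k ≤ k := by
  intro fuel
  induction fuel with
  | zero => intro k _; exact le_rfl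
  | succ fuel ih =>
    intro k hkf
    unfold pvAutoWalk
    split_ifs with h
    · have hb := (hf (k - 1) (by omega)).1
      exact le_trans (ih _ (by omega)) (by omega)
    · exact le_rfl

theorem pv_failWalk_eq {y : List Char} {f : List Nat} {c : Char}
    (hf : ∀ t, t < f.length → pvGoodAt y t (f.getD t 0)) :
    ∀ fuel k, k < y.length → k ≤ f.length →
      pvFailWalk y f c fuel k = pvAutoWalk y f c fuel k := by
  intro fuel
  induction fuel with
  | zero => intro k _ _; rfl
  | succ fuel ih =>
    intro k hkm hkf
    unfold pvFailWalk pvAutoWalk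
    have hcond : (0 < k ∧ ¬(c = y.getD k 'A')) ↔
        (0 < k ∧ (k = y.length ∨ ¬(c = y.getD k 'A'))) := by
      constructor
      · rintro ⟨h1, h2⟩; exact ⟨h1, Or.inr h2⟩
      · rintro ⟨h1, h2 | h2⟩
        · omega
        · exact ⟨h1, h2⟩
    split_ifs with h1 h2 h2
    · have hb := (hf (k - 1) (by omega)).1
      exact ih _ (by omega) (by omega)
    · exact absurd (hcond.mp h1) h2
    · exact absurd (hcond.mpr h2) h1
    · rfl

theorem pv_autoWalk_ext {y : List Char} {f : List Nat} {c : Char}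
    (hf : ∀ t, t < f.length → pvGoodAt y t (f.getD t 0)) :
    ∀ k, k ≤ y.length → k ≤ f.length → ∀ fuel, k ≤ fuel →
      (if pvAutoWalk y f c fuel k < y.length ∧ c = y.getD (pvAutoWalk y f c fuel k) 'A'
       then pvAutoWalk y f c fuel k + 1 else pvAutoWalk y f c fuel k) = pvExt y k c := by
  intro k
  induction k using Nat.strong_induction_on with
  | _ k ih =>
    intro hkm hkf fuel hfuel
    match fuel with
    | 0 =>
      have hk0 : k = 0 := by omega
      subst hk0
      show (if (0:ℕ) < y.length ∧ c = y.getD 0 'A' then 0 + 1 else 0) = pvExt y 0 c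
      rw [pv_ext_stop (by omega) (by simp)]
    | fuel + 1 =>
      by_cases h : 0 < k ∧ (k = y.length ∨ ¬(c = y.getD k 'A'))
      · obtain ⟨hk0, hor⟩ := h
        have hg := hf (k - 1) (by omega)
        have hb : f.getD (k - 1) 0 ≤ k - 1 := hg.1
        have hstep : pvAutoWalk y f c (fuel + 1) k =
            if 0 < k ∧ (k = y.length ∨ ¬(c = y.getD k 'A')) then
              pvAutoWalk y f c fuel (f.getD (k - 1) 0)
            else k := rfl
        have hc : 0 < k ∧ (k = y.length ∨ ¬(c = y.getD k 'A')) := ⟨hk0, hor⟩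
        rw [hstep, if_pos hc, ih (f.getD (k - 1) 0) (by omega) (by omega) (by omega) fuel (by omega)]
        exact (pv_ext_drop hk0 hkm hor hg).symm
      · have hstep : pvAutoWalk y f c (fuel + 1) k =
            if 0 < k ∧ (k = y.length ∨ ¬(c = y.getD k 'A')) then
              pvAutoWalk y f c fuel (f.getD (k - 1) 0)
            else k := rfl
        rw [hstep, if_neg h]
        exact (pv_ext_stop hkm h).symm

-- pvOv facts ---------------------------------------------------------------

theorem pv_ov_le (y u : List Char) : pvOv y u ≤ y.length := Nat.findGreatest_le _

theorem pv_ov_suffix (y u : List Char) : y.take (pvOv y u) <:+ u := by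
  rcases Nat.eq_zero_or_pos (pvOv y u) with h | h
  · simp [h]
  · exact Nat.findGreatest_of_ne_zero rfl (Nat.pos_iff_ne_zero.mp h)

theorem pv_ov_max {y u : List Char} {j : ℕ} (hj : j ≤ y.length) (h : y.take j <:+ u) :
    j ≤ pvOv y u := Nat.le_findGreatest hj h

theorem pv_ov_nil (y : List Char) : pvOv y [] = 0 := by
  apply Nat.findGreatest_eq_zero_iff.mpr
  intro n hn0 hnm h
  have hlen : (y.take n).length = 0 := by rw [List.suffix_nil.mp h]; rfl
  rw [List.length_take] at hlen
  omega

theorem pv_ov_snoc (y u : List Char) (c : Char) :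
    pvOv y (u ++ [c]) = pvExt y (pvOv y u) c := by
  unfold pvOv pvExt
  apply pv_fG_congr
  intro t ht0 htm
  have htm' : t - 1 < y.length := by omega
  have hrw : t - 1 + 1 = t := by omega
  rw [show y.take t = y.take (t - 1 + 1) by rw [hrw]]
  rw [pv_ext_iff htm']
  have hchain := pv_chain (y := y) (w := u) (K := pvOv y u) (J := y.length)
    (pv_ov_le y u) (pv_ov_suffix y u) (fun j hj h => pv_ov_max hj h) (t - 1) (by omega) (by omega)
  constructor
  · rintro ⟨h1, h2⟩
    obtain ⟨h3, h4⟩ := hchain.mp h1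
    exact ⟨ht0, h3, htm', h4, h2⟩
  · rintro ⟨_, h2, _, h4, h5⟩
    exact ⟨hchain.mpr ⟨h2, h4⟩, h5⟩

theorem pv_overlap_ov (y : List Char) (f : List Nat) (hlen : f.length = y.length)
    (hf : ∀ t, t < f.length → pvGoodAt y t (f.getD t 0)) :
    ∀ u : List Char, pvOverlap u y f = pvOv y u := by
  intro u
  induction u using List.reverseRecOn with
  | nil => simp [pvOverlap, pv_ov_nil]
  | append_singleton u c ih =>
    unfold pvOverlap at ih ⊢
    rw [List.foldl_append]
    simp only [List.foldl_cons, List.foldl_nil]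
    rw [ih]
    have := pv_autoWalk_ext (c := c) hf (pvOv y u) (pv_ov_le y u)
      (by rw [hlen]; exact pv_ov_le y u) (pvOv y u) le_rfl
    rw [pv_ov_snoc]
    exact this

-- weight = pvOv --------------------------------------------------------------

theorem pv_weightLoop_fG (x y : List Char) :
    ∀ n, pvWeightLoop x y x.length n = Nat.findGreatest (fun j => y.take j <:+ x) n := by
  intro n
  induction n with
  | zero => rfl
  | succ n ih =>
    unfold pvWeightLoop
    have hcond : PySem.Chars.endswith (PySem.List.slice x (some 0) (some (x.length : Int)))
        (PySem.List.slice y (some 0) (some ((n + 1 : Nat) : Int))) = true ↔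
        y.take (n + 1) <:+ x := by
      rw [PySem.List.slice_zero_start, PySem.List.slice_zero_start,
        PySem.List.slice_to_natCast, PySem.List.slice_to_natCast, List.take_length,
        PySem.Chars.endswith_iff]
    by_cases h : y.take (n + 1) <:+ x
    · rw [if_pos (hcond.mpr h)]
      exact (Nat.findGreatest_eq (P := fun j => y.take j <:+ x) h).symm
    · rw [if_neg (fun hc => h (hcond.mp hc)), ih]
      exact (Nat.findGreatest_of_not (P := fun j => y.take j <:+ x) h).symm

theorem pv_weight_ov (x y : List Char) : pvWeight x y = pvOv y x := by
  unfold pvWeight pvOv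
  rw [pv_weightLoop_fG]
  refine (pv_fG_shrink (Nat.min_le_right _ _) (fun j hj hP => ?_)).symm
  have h1 : (y.take j).length = j := by simp [List.length_take]; omega
  have h2 := hP.length_le
  omega

-- pvExt API ----------------------------------------------------------------

theorem pv_ext_spec {y : List Char} {k : ℕ} {c : Char} (h : pvExt y k c ≠ 0) :
    0 < pvExt y k c ∧ pvExt y k c - 1 ≤ k ∧ pvExt y k c - 1 < y.length ∧
      y.take (pvExt y k c - 1) <:+ y.take k ∧ y.getD (pvExt y k c - 1) 'A' = c :=
  Nat.findGreatest_of_ne_zero rfl h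

theorem pv_ext_max {y : List Char} {k t : ℕ} {c : Char} (htm : t ≤ y.length)
    (h : 0 < t ∧ t - 1 ≤ k ∧ t - 1 < y.length ∧ y.take (t - 1) <:+ y.take k ∧
      y.getD (t - 1) 'A' = c) : t ≤ pvExt y k c :=
  Nat.le_findGreatest htm h

-- the extension of a maximal proper border is the next maximal proper border
theorem pv_ext_goodAt {y : List Char} {i k : ℕ} (hi0 : 0 < i) (him : i < y.length)
    (hg : pvGoodAt y (i - 1) k) :
    pvGoodAt y i (pvExt y k (y.getD i 'A')) := by
  obtain ⟨hk1, hk2, hk3⟩ := hg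
  rw [show i - 1 + 1 = i by omega] at hk2 hk3
  set c := y.getD i 'A' with hc
  set E := pvExt y k c with hE
  refine ⟨?_, ?_, ?_⟩
  · rcases Nat.eq_zero_or_pos E with h | h
    · omega
    · have := (pv_ext_spec (y := y) (k := k) (c := c) (by omega)).2.1
      omega
  · rcases Nat.eq_zero_or_pos E with h | h
    · simp [h]
    · obtain ⟨_, hs2, hs3, hs4, hs5⟩ := pv_ext_spec (y := y) (k := k) (c := c) (by omega)
      rw [show E = E - 1 + 1 by omega, pv_take_snoc hs3, pv_take_snoc him]
      exact pv_suffix_snoc.mpr ⟨by rw [hs5], hs4.trans hk2⟩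
  · intro j hj hsfx
    rcases Nat.eq_zero_or_pos j with h | h
    · omega
    · have hjm : j - 1 < y.length := by omega
      rw [show j = j - 1 + 1 by omega, pv_take_snoc hjm, pv_take_snoc him] at hsfx
      obtain ⟨heq, hs⟩ := pv_suffix_snoc.mp hsfx
      have hchain := pv_chain (y := y) (w := y.take i) (K := k) (J := i - 1)
        (by omega) hk2 hk3 (j - 1) (by omega) (by omega)
      obtain ⟨hjk, hjs⟩ := hchain.mp hs
      exact pv_ext_max (by omega) ⟨h, hjk, hjm, hjs, by rw [heq]⟩

-- the builder maintains correctness of the failure table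
theorem pv_failGo_good (y : List Char) :
    ∀ (cs : List Char) (f : List Nat) (k : ℕ),
      0 < f.length → f.length ≤ y.length →
      y.drop f.length = cs →
      (∀ t, t < f.length → pvGoodAt y t (f.getD t 0)) →
      k = f.getD (f.length - 1) 0 →
      (pvFailGo y k f cs).length = y.length ∧
        ∀ t, t < y.length → pvGoodAt y t ((pvFailGo y k f cs).getD t 0) := by
  intro cs
  induction cs with
  | nil =>
    intro f k h0 hle hdrop hf hk
    have hfl : f.length = y.length := by
      have := List.drop_eq_nil_iff.mp (hdrop)
      omega
    exact ⟨hfl, fun t ht => hf t (by omega)⟩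
  | cons c cs ih =>
    intro f k h0 hle hdrop hf hk
    have him : f.length < y.length := by
      rcases Nat.lt_or_ge f.length y.length with h | h
      · exact h
      · rw [List.drop_eq_nil_of_le h] at hdrop
        exact absurd hdrop (by simp)
    have hc : y.getD f.length 'A' = c := by
      have h2 := congrArg (fun l => List.getD l 0 'A') hdrop
      simpa [List.getD_eq_getElem?_getD] using h2
    have hgprev : pvGoodAt y (f.length - 1) k := hk ▸ hf (f.length - 1) (by omega)
    have hkle : k ≤ f.length - 1 := hgprev.1
    -- the step value equals pvExt y k c
    have hwalk : pvFailWalk y f c k k = pvAutoWalk y f c k k :=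
      pv_failWalk_eq hf k k (by omega) (by omega)
    have hwle : pvAutoWalk y f c k k ≤ k := pv_autoWalk_le hf k k (by omega)
    have hstepval :
        (if c = y.getD (pvFailWalk y f c k k) 'A' then pvFailWalk y f c k k + 1
         else pvFailWalk y f c k k) = pvExt y k c := by
      rw [hwalk]
      rw [show (if c = y.getD (pvAutoWalk y f c k k) 'A' then pvAutoWalk y f c k k + 1
          else pvAutoWalk y f c k k) =
          (if pvAutoWalk y f c k k < y.length ∧ c = y.getD (pvAutoWalk y f c k k) 'A'
           then pvAutoWalk y f c k k + 1 else pvAutoWalk y f c k k) by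
        by_cases hcc : c = y.getD (pvAutoWalk y f c k k) 'A'
        · rw [if_pos hcc, if_pos ⟨by omega, hcc⟩]
        · rw [if_neg hcc, if_neg (fun hx => hcc hx.2)]]
      exact pv_autoWalk_ext hf k (by omega) (by omega) k le_rfl
    have hstep : pvFailGo y k f (c :: cs) =
        pvFailGo y (pvExt y k c) (f ++ [pvExt y k c]) cs := by
      show pvFailGo y
          (if c = y.getD (pvFailWalk y f c k k) 'A' then pvFailWalk y f c k k + 1
           else pvFailWalk y f c k k)
          (f ++ [if c = y.getD (pvFailWalk y f c k k) 'A' then pvFailWalk y f c k k + 1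
           else pvFailWalk y f c k k]) cs =
        pvFailGo y (pvExt y k c) (f ++ [pvExt y k c]) cs
      rw [hstepval]
    rw [hstep]
    have hgood_i : pvGoodAt y f.length (pvExt y k c) := by
      have := pv_ext_goodAt (y := y) (i := f.length) (k := k) (by omega) him hgprev
      rwa [hc] at this
    have happly := ih (f ++ [pvExt y k c]) (pvExt y k c)
      (by simp) (by simp; omega)
      (by
        have h2 := congrArg List.tail hdrop
        simp only [List.length_append, List.length_cons, List.length_nil]
        rw [show f.length + (0 + 1) = f.length + 1 by omega]
        rw [← List.drop_drop]
        simpa using h2)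
      (by
        intro t ht
        simp only [List.length_append, List.length_cons, List.length_nil] at ht
        rcases Nat.lt_or_ge t f.length with h | h
        · rw [List.getD_append f [pvExt y k c] 0 t h]
          exact hf t h
        · have hteq : t = f.length := by omega
          subst hteq
          rw [show (f ++ [pvExt y k c]).getD f.length 0 = pvExt y k c by
            simp [List.getD_eq_getElem?_getD]]
          exact hgood_i)
      (by
        simp only [List.length_append, List.length_cons, List.length_nil]
        rw [show f.length + (0 + 1) - 1 = f.length by omega]
        rw [show (f ++ [pvExt y k c]).getD f.length 0 = pvExt y k c by
          simp [List.getD_eq_getElem?_getD]])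
    exact happly

theorem pv_fail_good (y : List Char) :
    (pvFail y).length = y.length ∧
      ∀ t, t < y.length → pvGoodAt y t ((pvFail y).getD t 0) := by
  match y with
  | [] => exact ⟨rfl, fun t ht => by simp at ht⟩
  | c :: rest =>
    show (pvFailGo (c :: rest) 0 [0] rest).length = (c :: rest).length ∧ _
    apply pv_failGo_good (c :: rest) rest [0] 0
    · simp
    · simp
    · rfl
    · intro t ht
      simp only [List.length_cons, List.length_nil] at ht
      have : t = 0 := by omega
      subst this
      refine ⟨le_rfl, ?_, fun j hj _ => by omega⟩
      simp
    · rfl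

-- main per-pair equality
theorem pv_overlap_weight (t y : List Char) : pvOverlap t y (pvFail y) = pvWeight t y := by
  obtain ⟨hlen, hf⟩ := pv_fail_good y
  rw [pv_overlap_ov y (pvFail y) hlen (fun j hj => hf j (by omega)), pv_weight_ov]

-- ===== VERDICT (by name: the statement is the Claim_ definition above) =====
theorem adj_matrix_spec : Claim_equal_adj_matrix := by
  intro x _
  show adj_matrix x = adj_matrix_alt x
  simp only [adj_matrix, adj_matrix_alt]
  refine List.map_congr_left (fun i hi => List.map_congr_left (fun j hj => ?_))
  have hj' : j < x.length := List.mem_range.mp hj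
  by_cases h : i = j <;>
    simp [h, pv_overlap_weight, List.getElem?_eq_getElem hj']
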